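-- pv_equiv track=rewrite | github.com/sachinsahoo98/Test_Repository_Code | Strings/cod13.py | acceptString
-- ===== SOURCE A (Python) =====
-- def acceptString(inputStr):
--
--     vowelList = {'a', 'e', 'i', 'o', 'u'}
--     vowelsCount = set()
--     status = "Not Accepted"
--
--     for char in inputStr:
--         if char.lower() in vowelList:
--             vowelsCount.add(char.lower())
--     if vowelsCount == vowelList:
--             return "Accepted"
--     return status
-- ===== SOURCE B (Python) =====
-- def acceptString(inputStr):
--     if all(any(c.lower() == v for c in inputStr) for v in ('a', 'e', 'i', 'o', 'u')):
--         return "Accepted"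
--     return "Not Accepted"
-- ===== Notes on version B (the rewrite author's own statement) =====
-- stated objective: idiomatic
-- what changed: Replaced A's char-outer single pass that accumulates a set of seen vowels and compares it for set equality with a vowel-outer all/any: for each of the five vowels test whether some character lowercases to it, maintaining no state.
import Mathlib
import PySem

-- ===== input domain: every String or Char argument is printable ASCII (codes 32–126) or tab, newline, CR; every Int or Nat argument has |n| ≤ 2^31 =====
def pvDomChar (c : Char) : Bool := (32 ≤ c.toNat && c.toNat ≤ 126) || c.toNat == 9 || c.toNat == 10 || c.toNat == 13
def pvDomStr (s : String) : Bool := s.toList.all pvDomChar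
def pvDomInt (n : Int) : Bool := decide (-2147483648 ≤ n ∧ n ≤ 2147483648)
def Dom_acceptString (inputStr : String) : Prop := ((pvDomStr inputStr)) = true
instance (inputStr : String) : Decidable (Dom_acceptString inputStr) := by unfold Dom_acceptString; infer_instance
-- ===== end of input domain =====

-- B replaces A's set-accumulating single pass with an idiomatic vowel-outer all/any membership test; same results.


-- ===== PORT A =====
def acceptString (inputStr : String) : String :=
  let vowelList : PySem.Set Char := PySem.Set.ofList ['a', 'e', 'i', 'o', 'u']
  let vowelsCount : PySem.Set Char := inputStr.toList.foldl
    (fun acc ch =>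
      if PySem.Set.contains vowelList (PySem.Chars.lowerChar ch)
      then PySem.Set.add acc (PySem.Chars.lowerChar ch)
      else acc)
    PySem.Set.empty
  let status := "Not Accepted"
  if PySem.Set.equal vowelsCount vowelList then "Accepted" else status

-- ===== PORT B =====
def acceptString_alt (inputStr : String) : String :=
  if (['a', 'e', 'i', 'o', 'u'] : List Char).all
       (fun v => inputStr.toList.any (fun c => PySem.Chars.lowerChar c == v))
  then "Accepted" else "Not Accepted"

-- ===== PRECONDITION & SPEC =====
def Spec_acceptString (inputStr : String) (out : String) : Prop := out = acceptString_alt inputStr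
instance (inputStr : String) (out : String) : Decidable (Spec_acceptString inputStr out) := by unfold Spec_acceptString; infer_instance

-- ===== CLAIM (what is proved, stated in full; the proofs are below) =====
def Claim_equal_acceptString : Prop := ∀ (inputStr : String), Dom_acceptString inputStr → Spec_acceptString inputStr (acceptString inputStr)

-- ===== LEMMAS AND PROOFS =====

-- Membership in A's accumulated vowel set: x is there iff it was there already, or
-- x is a vowel and some character of the remaining input lowercases to it.
theorem mem_vowel_fold (l : List Char) (acc : List Char) (x : Char) :
    x ∈ l.foldl
      (fun acc ch =>
        if PySem.Set.contains (PySem.Set.ofList ['a', 'e', 'i', 'o', 'u']) (PySem.Chars.lowerChar ch)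
        then PySem.Set.add acc (PySem.Chars.lowerChar ch)
        else acc) acc ↔
    x ∈ acc ∨ (x ∈ (['a', 'e', 'i', 'o', 'u'] : List Char) ∧ ∃ c ∈ l, PySem.Chars.lowerChar c = x) := by
  induction l generalizing acc with
  | nil => simp
  | cons c l ih =>
    simp only [List.foldl_cons]
    split
    · rename_i h
      have hv : PySem.Chars.lowerChar c ∈ (['a', 'e', 'i', 'o', 'u'] : List Char) := by
        have := (PySem.Set.contains_iff _ _).mp h
        simpa [PySem.Set.mem_ofList] using this
      rw [ih]
      simp only [PySem.Set.mem_add, List.mem_cons]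
      aesop
    · rename_i h
      have hv : PySem.Chars.lowerChar c ∉ (['a', 'e', 'i', 'o', 'u'] : List Char) := by
        intro hm
        exact h ((PySem.Set.contains_iff _ _).mpr (by simpa [PySem.Set.mem_ofList] using hm))
      rw [ih]
      simp only [List.mem_cons]
      aesop

-- ===== VERDICT (by name: the statement is the Claim_ definition above) =====
theorem acceptString_spec : Claim_equal_acceptString := by
  intro s _
  show acceptString s = acceptString_alt s
  unfold acceptString acceptString_alt
  have hofl : PySem.Set.ofList (['a', 'e', 'i', 'o', 'u'] : List Char) = ['a', 'e', 'i', 'o', 'u'] := by decide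
  by_cases hall :
      (['a', 'e', 'i', 'o', 'u'] : List Char).all
        (fun v => s.toList.any (fun c => PySem.Chars.lowerChar c == v)) = true
  · have heq : PySem.Set.equal
        (s.toList.foldl
          (fun acc ch =>
            if PySem.Set.contains (PySem.Set.ofList ['a', 'e', 'i', 'o', 'u']) (PySem.Chars.lowerChar ch)
            then PySem.Set.add acc (PySem.Chars.lowerChar ch)
            else acc) PySem.Set.empty)
        (PySem.Set.ofList ['a', 'e', 'i', 'o', 'u']) = true := by
      rw [PySem.Set.equal_iff]
      intro x
      rw [mem_vowel_fold, hofl]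
      simp only [List.all_eq_true, List.any_eq_true, beq_iff_eq] at hall
      constructor
      · rintro (hx | ⟨hvx, _⟩)
        · exact absurd hx (List.not_mem_nil)
        · exact hvx
      · intro hx
        obtain ⟨c, hc, hcl⟩ := hall x hx
        exact Or.inr ⟨hx, c, hc, hcl⟩
    simp only [heq, hall, if_true]
  · have heq : PySem.Set.equal
        (s.toList.foldl
          (fun acc ch =>
            if PySem.Set.contains (PySem.Set.ofList ['a', 'e', 'i', 'o', 'u']) (PySem.Chars.lowerChar ch)
            then PySem.Set.add acc (PySem.Chars.lowerChar ch)
            else acc) PySem.Set.empty)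
        (PySem.Set.ofList ['a', 'e', 'i', 'o', 'u']) = false := by
      rw [Bool.eq_false_iff]
      intro hcontra
      apply hall
      rw [PySem.Set.equal_iff] at hcontra
      simp only [List.all_eq_true, List.any_eq_true, beq_iff_eq]
      intro v hv
      have := (hcontra v).mpr (by rw [hofl]; exact hv)
      rw [mem_vowel_fold] at this
      rcases this with hx | ⟨_, c, hc, hcl⟩
      · exact absurd hx (List.not_mem_nil)
      · exact ⟨c, hc, hcl⟩
    simp only [heq, hall]
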